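-- pv_equiv track=rewrite | github.com/rahulmadaan/foo-bar | challenge2/lovely-lucky-lambs/lambs.py | distribute_stingy
-- ===== SOURCE A (Python) =====
-- def distribute_stingy(total_lambs):
--     count = 0
--     # fibo_list = fibo_list_generator()
--     fibo_list = [0, 1, 1, 2, 3, 5, 8, 13, 21, 34, 55, 89, 144, 233, 377, 610, 987, 1597, 2584, 4181, 6765, 10946, 17711,
--                  28657, 46368, 75025, 121393, 196418, 317811, 514229, 832040, 1346269, 2178309, 3524578, 5702887,
--                  9227465, 14930352, 24157817, 39088169, 63245986, 102334155, 165580141, 267914296, 433494437, 701408733,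
--                  1134903170, 1836311903, 2971215073, 4807526976, 7778742049, 12586269025, 20365011074, 32951280099,
--                  53316291173, 86267571272, 139583862445, 225851433717, 365435296162, 591286729879, 956722026041,
--                  154800875592]
--     for index in range(0, len(fibo_list)):
--         if count < total_lambs:
--             count = count + fibo_list[index]
--         if count > total_lambs:
--             return index
--         if count == total_lambs:
--             return index + 1
-- ===== SOURCE B (Python) =====
-- _FIBS = [0, 1, 1, 2, 3, 5, 8, 13, 21, 34, 55, 89, 144, 233, 377, 610, 987, 1597, 2584, 4181, 6765, 10946, 17711,
--          28657, 46368, 75025, 121393, 196418, 317811, 514229, 832040, 1346269, 2178309, 3524578, 5702887,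
--          9227465, 14930352, 24157817, 39088169, 63245986, 102334155, 165580141, 267914296, 433494437, 701408733,
--          1134903170, 1836311903, 2971215073, 4807526976, 7778742049, 12586269025, 20365011074, 32951280099,
--          53316291173, 86267571272, 139583862445, 225851433717, 365435296162, 591286729879, 956722026041,
--          154800875592]
--
-- # cumulative sums of _FIBS, built once at module load; nondecreasing
-- _CUM = []
-- _run = 0
-- for _f in _FIBS:
--     _run += _f
--     _CUM.append(_run)
--
--
-- def distribute_stingy(total_lambs):
--     # binary search (bisect_left) for the first prefix sum >= total_lambs
--     lo, hi = 0, len(_CUM)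
--     while lo < hi:
--         mid = (lo + hi) // 2
--         if _CUM[mid] < total_lambs:
--             lo = mid + 1
--         else:
--             hi = mid
--     if lo == len(_CUM):
--         return None
--     return lo + 1 if _CUM[lo] == total_lambs else lo
-- ===== Notes on version B (the rewrite author's own statement) =====
-- stated objective: alternative
-- what changed: Replaces A's linear accumulate-and-compare loop over the fib list with a prefix-sum table built once at module load plus a hand-written bisect_left binary search for the first prefix sum >= total_lambs.
import Mathlib
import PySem

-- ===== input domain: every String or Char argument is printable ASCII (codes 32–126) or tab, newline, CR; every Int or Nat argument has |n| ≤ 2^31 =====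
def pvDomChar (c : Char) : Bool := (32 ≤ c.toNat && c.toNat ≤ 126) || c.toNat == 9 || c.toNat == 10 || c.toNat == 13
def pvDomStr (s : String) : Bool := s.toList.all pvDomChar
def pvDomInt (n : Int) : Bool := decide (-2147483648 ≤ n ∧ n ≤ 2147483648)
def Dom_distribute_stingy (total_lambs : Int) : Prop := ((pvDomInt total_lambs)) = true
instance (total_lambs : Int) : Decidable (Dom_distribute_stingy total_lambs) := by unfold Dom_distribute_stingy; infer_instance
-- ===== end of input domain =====

-- B replaces A's linear accumulate-and-compare scan with a prefix-sum table built once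
-- plus a bisect_left-style binary search (objective: alternative algorithm).

-- ===== PORT A =====
def fibListA : List Int := [0, 1, 1, 2, 3, 5, 8, 13, 21, 34, 55, 89, 144, 233, 377, 610, 987, 1597, 2584, 4181, 6765, 10946, 17711,
  28657, 46368, 75025, 121393, 196418, 317811, 514229, 832040, 1346269, 2178309, 3524578, 5702887,
  9227465, 14930352, 24157817, 39088169, 63245986, 102334155, 165580141, 267914296, 433494437, 701408733,
  1134903170, 1836311903, 2971215073, 4807526976, 7778742049, 12586269025, 20365011074, 32951280099,
  53316291173, 86267571272, 139583862445, 225851433717, 365435296162, 591286729879, 956722026041,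
  154800875592]

-- A's for-loop over range(0, len(fibo_list)): structural recursion over the list, carrying
-- `count` and the running `index`; falling off the loop returns None.
def loopA (t : Int) : List Int → Int → Int → Option Int
  | [], _, _ => none
  | f :: rest, count, idx =>
    let count' := if count < t then count + f else count
    if count' > t then some idx
    else if count' = t then some (idx + 1)
    else loopA t rest count' (idx + 1)

def distribute_stingy (total_lambs : Int) : Option Int :=
  loopA total_lambs fibListA 0 0

-- ===== PORT B =====
-- Source B's own _FIBS literal
def fibListB : List Int := [0, 1, 1, 2, 3, 5, 8, 13, 21, 34, 55, 89, 144, 233, 377, 610, 987, 1597, 2584, 4181, 6765, 10946, 17711,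
  28657, 46368, 75025, 121393, 196418, 317811, 514229, 832040, 1346269, 2178309, 3524578, 5702887,
  9227465, 14930352, 24157817, 39088169, 63245986, 102334155, 165580141, 267914296, 433494437, 701408733,
  1134903170, 1836311903, 2971215073, 4807526976, 7778742049, 12586269025, 20365011074, 32951280099,
  53316291173, 86267571272, 139583862445, 225851433717, 365435296162, 591286729879, 956722026041,
  154800875592]

-- Source B's module-level running-sum loop building _CUM
def cumOf : Int → List Int → List Int
  | _, [] => []
  | run, f :: rest => (run + f) :: cumOf (run + f) rest

def cumList : List Int := cumOf 0 fibListB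

-- Source B's hand-written bisect_left while-loop on (lo, hi); xs[mid] is in range whenever
-- lo < hi ≤ len xs, so getD is exact for Python's xs[mid] there.
def blgo (xs : List Int) (t : Int) (lo hi : Nat) : Nat :=
  if _h : lo < hi then
    let mid := (lo + hi) / 2
    if xs.getD mid 0 < t then blgo xs t (mid + 1) hi else blgo xs t lo mid
  else lo
termination_by hi - lo
decreasing_by all_goals omega

def distribute_stingy_alt (total_lambs : Int) : Option Int :=
  let lo := blgo cumList total_lambs 0 cumList.length
  if lo = cumList.length then none
  else if cumList.getD lo 0 = total_lambs then some ((lo : Int) + 1) else some (lo : Int)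

-- ===== PRECONDITION & SPEC =====
def Spec_distribute_stingy (total_lambs : Int) (out : Option Int) : Prop := out = distribute_stingy_alt total_lambs
instance (total_lambs : Int) (out : Option Int) : Decidable (Spec_distribute_stingy total_lambs out) := by unfold Spec_distribute_stingy; infer_instance

-- ===== CLAIM (what is proved, stated in full; the proofs are below) =====
def Claim_equal_distribute_stingy : Prop := ∀ (total_lambs : Int), Dom_distribute_stingy total_lambs → Spec_distribute_stingy total_lambs (distribute_stingy total_lambs)

-- ===== LEMMAS AND PROOFS =====

-- A's loop, entered with count < t, returns exactly the first-crossing answer over the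
-- running prefix sums of the remaining fib values.
theorem loopA_eq_find (fs : List Int) : ∀ (count idx t : Int), count < t →
    loopA t fs count idx =
      (let C := cumOf count fs
       let i := C.findIdx (fun c => t ≤ c)
       if i = C.length then none
       else if C.getD i 0 = t then some (idx + i + 1) else some (idx + i)) := by
  induction fs with
  | nil => intro count idx t h; simp [loopA, cumOf]
  | cons f rest ih =>
    intro count idx t h
    simp only [loopA, cumOf, if_pos h]
    rcases lt_trichotomy t (count + f) with hlt | heq | hgt
    · simp [List.findIdx_cons, le_of_lt hlt, hlt]
      omega
    · simp [List.findIdx_cons, heq]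
    · have h1 : ¬ count + f > t := by omega
      have h2 : ¬ count + f = t := by omega
      rw [if_neg h1, if_neg h2, ih (count + f) (idx + 1) t hgt]
      simp only [List.findIdx_cons, List.length_cons, List.getD]
      have hp : ¬ t ≤ count + f := by omega
      simp only [hp, decide_false, cond_false]
      set C' := cumOf (count + f) rest
      set i := C'.findIdx (fun c => t ≤ c)
      by_cases hi : i = C'.length
      · simp [hi]
      · rw [if_neg hi, if_neg (by omega : ¬ i + 1 = C'.length + 1)]
        simp only [List.getElem?_cons_succ]
        push_cast
        split_ifs <;> · congr 1; omega

-- Source B's binary search returns the leftmost index with xs[i] ≥ t on a sorted list,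
-- i.e. List.findIdx (t ≤ ·).
theorem blgo_eq_findIdx (xs : List Int) (t : Int) (hs : List.Pairwise (· ≤ ·) xs) :
    ∀ (n lo hi : Nat), hi - lo = n → lo ≤ hi → hi ≤ xs.length →
    (∀ j, j < lo → xs.getD j 0 < t) → (∀ j, hi ≤ j → j < xs.length → t ≤ xs.getD j 0) →
    blgo xs t lo hi = xs.findIdx (fun c => t ≤ c) := by
  have mono : ∀ (i j : Nat), i ≤ j → j < xs.length → xs.getD i 0 ≤ xs.getD j 0 := by
    intro i j hij hj
    rcases eq_or_lt_of_le hij with rfl | hlt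
    · exact le_refl _
    · rw [List.getD_eq_getElem _ _ (lt_of_le_of_lt hij hj), List.getD_eq_getElem _ _ hj]
      exact List.pairwise_iff_getElem.mp hs i j _ hj hlt
  intro n
  induction n using Nat.strong_induction_on with
  | _ n ihn =>
    intro lo hi hn hle hlen hlo hhi
    rw [blgo]
    by_cases h : lo < hi
    · rw [dif_pos h]
      set mid := (lo + hi) / 2 with hmid
      have hmlt : mid < hi := by omega
      have hmge : lo ≤ mid := by omega
      by_cases hc : xs.getD mid 0 < t
      · rw [if_pos hc]
        refine ihn (hi - (mid + 1)) (by omega) (mid + 1) hi rfl (by omega) hlen ?_ hhi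
        intro j hj
        by_cases hjl : j < lo
        · exact hlo j hjl
        · exact lt_of_le_of_lt (mono j mid (by omega) (by omega)) hc
      · rw [if_neg hc]
        refine ihn (mid - lo) (by omega) lo mid rfl (by omega) (by omega) hlo ?_
        intro j hj hjlen
        exact le_trans (not_lt.mp hc) (mono mid j hj hjlen)
    · rw [dif_neg h]
      have hlohi : lo = hi := by omega
      set F := xs.findIdx (fun c => t ≤ c) with hF
      have hFle : F ≤ xs.length := List.findIdx_le_length
      rcases lt_trichotomy lo F with hlt | heq | hgt
      · exfalso
        have hlolen : lo < xs.length := lt_of_lt_of_le hlt hFle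
        have := List.not_of_lt_findIdx (p := fun c => t ≤ c) (xs := xs) (h := hlt)
        have h2 : t ≤ xs.getD lo 0 := hhi lo (le_of_eq hlohi.symm) hlolen
        rw [List.getD_eq_getElem _ _ hlolen] at h2
        simp at this; omega
      · exact heq
      · exfalso
        have hFlen : F < xs.length := lt_of_lt_of_le (lt_of_lt_of_le hgt (hlohi ▸ hlen)) (le_refl _)
        have hp : (fun c => decide (t ≤ c)) xs[F] = true := List.findIdx_getElem (w := hFlen)
        have h2 : xs.getD F 0 < t := hlo F hgt
        rw [List.getD_eq_getElem _ _ hFlen] at h2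
        simp at hp; omega

theorem cumList_sorted : List.Pairwise (· ≤ ·) cumList := by decide

-- B's port rewritten with findIdx in place of the binary search
theorem alt_eq_find (t : Int) : distribute_stingy_alt t =
    (let i := cumList.findIdx (fun c => t ≤ c)
     if i = cumList.length then none
     else if cumList.getD i 0 = t then some ((i : Int) + 1) else some (i : Int)) := by
  unfold distribute_stingy_alt
  rw [blgo_eq_findIdx cumList t cumList_sorted cumList.length 0 cumList.length
      (by omega) (by omega) (le_refl _) (fun j hj => absurd hj (by omega))
      (fun j h1 h2 => absurd h2 (by omega))]

theorem distribute_stingy_spec : Claim_equal_distribute_stingy := by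
  intro t _
  unfold Spec_distribute_stingy
  rw [alt_eq_find]
  by_cases ht : 0 < t
  · show loopA t fibListA 0 0 = _
    rw [loopA_eq_find fibListA 0 0 t ht]
    show (let C := cumList
          let i := C.findIdx (fun c => t ≤ c)
          if i = C.length then none
          else if C.getD i 0 = t then some (0 + (i : Int) + 1) else some (0 + (i : Int))) = _
    simp only [zero_add]
  · -- t ≤ 0: the first fib value is 0, so both sides decide on the head prefix sum 0
    have hnt : ¬ (0 : Int) < t := ht
    have hA : loopA t fibListA 0 0 = if (0 : Int) = t then some 1 else some 0 := by
      rw [show fibListA = 0 :: fibListA.tail from rfl]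
      simp only [loopA, add_zero, if_neg hnt]
      by_cases h0 : (0 : Int) = t
      · rw [if_neg (by omega : ¬ (0 : Int) > t), if_pos h0, if_pos h0]; rfl
      · rw [if_pos (by omega : (0 : Int) > t), if_neg h0]
    have hhead : cumList = 0 :: cumList.tail := by rfl
    have hp : decide (t ≤ (0 : Int)) = true := by simp; omega
    show loopA t fibListA 0 0 = _
    rw [hA, hhead]
    simp only [List.findIdx_cons, hp, cond_true, List.length_cons, List.getD,
      List.getElem?_cons_zero, Option.getD_some, Nat.cast_zero, zero_add]
    rw [if_neg (by omega : ¬ (0 : Nat) = cumList.tail.length + 1)]
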